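-- pv_equiv track=rewrite | github.com/DiogoZeca/FP | extra3/E4.py | longestPrefixRepeated
-- ===== SOURCE A (Python) =====
-- def longestPrefixRepeated(s):
--    if len(s) == 0:
--       return ''
--    final = ''
--    for i in range(len(s)):
--       for j in range(i+1, len(s)):
--          if s[i:j] in s[j:]:
--             if len(s[i:j]) > len(final):
--                final = s[i:j]
--
--    return final
-- ===== SOURCE B (Python) =====
-- def longestPrefixRepeated(s):
--     # Binary search on the repeat length (feasibility is monotone), checking each
--     # candidate length with a single left-to-right scan using C-speed substring search.
--     n = len(s)
--
--     def first_start(L):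
--         # smallest i such that s[i:i+L] occurs again at some position >= i+L, else None
--         for i in range(0, n - L):
--             if s[i:i+L] in s[i+L:]:
--                 return i
--         return None
--
--     lo, hi = 1, n - 1
--     best_i, best_len = 0, 0
--     while lo <= hi:
--         mid = (lo + hi) // 2
--         i = first_start(mid)
--         if i is None:
--             hi = mid - 1
--         else:
--             best_i, best_len = i, mid
--             lo = mid + 1
--     return s[best_i:best_i + best_len]
-- ===== Notes on version B (the rewrite author's own statement) =====
-- stated objective: faster
-- what changed: Replaces A's exhaustive scan over all (start,end) pairs with a binary search on the repeat length (feasibility of a length is monotone), each probe being a single left-to-right scan for the first start index, returning the same longest-earliest repeated substring.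
import Mathlib
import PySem

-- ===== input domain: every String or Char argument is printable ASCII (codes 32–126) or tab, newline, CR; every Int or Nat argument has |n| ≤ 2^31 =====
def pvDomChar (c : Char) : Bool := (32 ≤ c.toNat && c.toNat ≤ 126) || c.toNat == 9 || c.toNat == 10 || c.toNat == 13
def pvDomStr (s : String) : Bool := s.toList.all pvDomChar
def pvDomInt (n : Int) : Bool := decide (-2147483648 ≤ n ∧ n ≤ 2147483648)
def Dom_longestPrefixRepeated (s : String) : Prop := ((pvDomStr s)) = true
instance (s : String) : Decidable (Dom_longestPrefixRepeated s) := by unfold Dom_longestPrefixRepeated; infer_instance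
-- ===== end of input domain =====

-- B replaces A's exhaustive scan over all (start,end) pairs by a binary search on the
-- repeat length (feasibility is monotone), each probe a single scan for the first start
-- index; same result, asymptotically fewer Python-level iterations.

-- ===== PORT A =====
-- inner loop body of A:  if s[i:j] in s[j:]: if len(s[i:j]) > len(final): final = s[i:j]
def pvInnerA (cs : List Char) (i : Int) (final : List Char) (j : Int) : List Char :=
  if PySem.Chars.isIn (PySem.List.slice cs (some i) (some j))
      (PySem.List.slice cs (some j) none) then
    if (PySem.List.slice cs (some i) (some j)).length > final.length then
      PySem.List.slice cs (some i) (some j)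
    else final
  else final

-- outer loop body of A:  for j in range(i+1, len(s)): …
def pvOuterA (cs : List Char) (final : List Char) (i : Int) : List Char :=
  (PySem.List.pyRange (i + 1) (cs.length : Int) 1).foldl (pvInnerA cs i) final

def longestPrefixRepeated (s : String) : String :=
  let cs := s.toList
  if cs.length = 0 then "" else
  String.ofList ((PySem.List.pyRange 0 (cs.length : Int) 1).foldl (pvOuterA cs) [])

-- ===== PORT B =====
-- Source B's first_start: for i in range(0, n-L): if s[i:i+L] in s[i+L:]: return i; return None
def pvFirstStartGo (cs : List Char) (L : Int) : List Int → Option Int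
  | [] => none
  | i :: rest =>
    if PySem.Chars.isIn (PySem.List.slice cs (some i) (some (i + L)))
        (PySem.List.slice cs (some (i + L)) none) then some i
    else pvFirstStartGo cs L rest

def pvFirstStart (cs : List Char) (L : Int) : Option Int :=
  pvFirstStartGo cs L (PySem.List.pyRange 0 ((cs.length : Int) - L) 1)

-- Source B's while-loop: binary search on the length
def pvBSearch (cs : List Char) (lo hi bestI bestLen : Int) : Int × Int :=
  if _h : lo ≤ hi then
    let mid := PySem.Int.floordiv (lo + hi) 2
    match pvFirstStart cs mid with
    | none => pvBSearch cs lo (mid - 1) bestI bestLen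
    | some i => pvBSearch cs (mid + 1) hi i mid
  else (bestI, bestLen)
termination_by (hi + 1 - lo).toNat
decreasing_by
  · have := PySem.Int.floordiv_two_mid_bounds _h; omega
  · have := PySem.Int.floordiv_two_mid_bounds _h; omega

def longestPrefixRepeated_alt (s : String) : String :=
  let cs := s.toList
  let p := pvBSearch cs 1 ((cs.length : Int) - 1) 0 0
  String.ofList (PySem.List.slice cs (some p.1) (some (p.1 + p.2)))

-- ===== PRECONDITION & SPEC =====
def Spec_longestPrefixRepeated (s : String) (out : String) : Prop := out = longestPrefixRepeated_alt s
instance (s : String) (out : String) : Decidable (Spec_longestPrefixRepeated s out) := by unfold Spec_longestPrefixRepeated; infer_instance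

-- ===== CLAIM (what is proved, stated in full; the proofs are below) =====
def Claim_equal_longestPrefixRepeated : Prop := ∀ (s : String), Dom_longestPrefixRepeated s → Spec_longestPrefixRepeated s (longestPrefixRepeated s)

-- ===== LEMMAS AND PROOFS =====

-- s[i:i+L] occurs again at some position ≥ i+L
def pvOcc (cs : List Char) (i L : Nat) : Bool :=
  decide ((cs.drop i).take L <:+: cs.drop (i + L))

-- …and the slice s[i:i+L] really has length L inside the string (i+L < n, A's j < n)
def pvValid (cs : List Char) (i L : Nat) : Bool :=
  decide (i + L < cs.length) && pvOcc cs i L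

-- longest valid repeat length starting at i (0 if none)
def pvMi (cs : List Char) (i : Nat) : Nat :=
  Nat.findGreatest (fun L => 0 < L ∧ pvValid cs i L = true) cs.length

-- longest valid repeat length over starts i < k (0 if none)
def pvLb (cs : List Char) (k : Nat) : Nat :=
  ((List.range k).map (pvMi cs)).foldl max 0

-- least start i < k that is valid at length L (0 if none)
def pvIb (cs : List Char) (k L : Nat) : Nat :=
  (((List.range k).find? (fun i => pvValid cs i L))).getD 0

def pvLstar (cs : List Char) : Nat := pvLb cs cs.length
def pvIstar (cs : List Char) : Nat := pvIb cs cs.length (pvLstar cs)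
def pvBest (cs : List Char) : List Char := (cs.drop (pvIstar cs)).take (pvLstar cs)

-- the cut-off best length seen by A's inner loop up to j < m
def pvMiB (cs : List Char) (i m : Nat) : Nat :=
  Nat.findGreatest (fun L => 0 < L ∧ i + L < m ∧ pvOcc cs i L = true) cs.length

-- ---- generic glue ----

lemma pvFindGreatest_congr {P Q : Nat → Prop} [DecidablePred P] [DecidablePred Q]
    (h : ∀ k, P k ↔ Q k) (n : Nat) : Nat.findGreatest P n = Nat.findGreatest Q n := by
  induction n with
  | zero => rfl
  | succ n ih =>
    rw [Nat.findGreatest_succ, Nat.findGreatest_succ, ih]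
    by_cases hq : Q (n+1)
    · rw [if_pos ((h _).mpr hq), if_pos hq]
    · rw [if_neg (fun hp => hq ((h _).mp hp)), if_neg hq]

lemma pvFindGreatest_pos_spec {P : Nat → Prop} [DecidablePred P] {n : Nat}
    (h : 0 < Nat.findGreatest P n) : P (Nat.findGreatest P n) := by
  induction n with
  | zero => simp [Nat.findGreatest] at h
  | succ n ih =>
    rw [Nat.findGreatest_succ] at h ⊢
    split
    · assumption
    · rename_i hnp
      rw [if_neg hnp] at h
      exact ih h

lemma pvFindGreatest_eq_of {P : Nat → Prop} [DecidablePred P] {n v : Nat}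
    (hP : P v) (hv : v ≤ n) (hmax : ∀ L, P L → L ≤ v) : Nat.findGreatest P n = v := by
  exact le_antisymm (hmax _ (Nat.findGreatest_spec hv hP)) (Nat.le_findGreatest hv hP)

lemma pvFind?_congr_mem {α : Type} {p q : α → Bool} {l : List α}
    (h : ∀ a ∈ l, p a = q a) : l.find? p = l.find? q := by
  induction l with
  | nil => rfl
  | cons a l ih =>
    simp only [List.find?_cons]
    rw [h a (by simp)]
    cases q a
    · exact ih (fun b hb => h b (by simp [hb]))
    · rfl

lemma pvPyRange_one_nil {a b : Int} (h : b ≤ a) : PySem.List.pyRange a b 1 = [] := by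
  rw [PySem.List.pyRange_of_pos _ _ (by norm_num : (0:Int) < 1)]
  rw [if_neg (by omega)]
  simp

-- ---- bridging A/B conditions to pvOcc ----

lemma pvCondA (cs : List Char) (i j : Nat) (hij : i ≤ j) :
    PySem.Chars.isIn (PySem.List.slice cs (some (i : Int)) (some (j : Int)))
      (PySem.List.slice cs (some (j : Int)) none) = pvOcc cs i (j - i) := by
  have h1 : PySem.List.slice cs (some (i : Int)) (some (j : Int)) = (cs.drop i).take (j - i) :=
    PySem.List.slice_natCast cs i j
  have h2 : PySem.List.slice cs (some (j : Int)) none = cs.drop j :=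
    PySem.List.slice_from cs (by positivity)
  rw [h1, h2, pvOcc]
  have hij' : i + (j - i) = j := by omega
  rw [hij']
  rw [Bool.eq_iff_iff]
  simp only [decide_eq_true_eq]
  exact PySem.Chars.isIn_iff_infix _ _

lemma pvLenA (cs : List Char) (i j : Nat) (hj : j ≤ cs.length) :
    (PySem.List.slice cs (some (i : Int)) (some (j : Int))).length = j - i := by
  rw [PySem.List.slice_natCast cs i j]
  simp only [List.length_take, List.length_drop]
  omega

lemma pvLenTake (cs : List Char) (i L : Nat) (h : i + L ≤ cs.length) :
    ((cs.drop i).take L).length = L := by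
  simp only [List.length_take, List.length_drop]
  omega

-- ---- monotonicity ----

lemma pvOcc_mono (cs : List Char) (i : Nat) {L L' : Nat} (h : pvOcc cs i L = true)
    (hLL : L' ≤ L) : pvOcc cs i L' = true := by
  rw [pvOcc, decide_eq_true_eq] at h ⊢
  have hpre : (cs.drop i).take L' <+: (cs.drop i).take L := by
    have : (cs.drop i).take L' = ((cs.drop i).take L).take L' := by
      rw [List.take_take, Nat.min_eq_left hLL]
    rw [this]
    exact List.take_prefix _ _
  have hsuf : cs.drop (i + L) <:+ cs.drop (i + L') := by
    have : cs.drop (i + L) = (cs.drop (i + L')).drop (L - L') := by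
      rw [List.drop_drop]; congr 1; omega
    rw [this]; exact List.drop_suffix _ _
  exact List.IsInfix.trans (hpre.isInfix) (List.IsInfix.trans h hsuf.isInfix)

lemma pvValid_mono (cs : List Char) (i : Nat) {L L' : Nat} (h : pvValid cs i L = true)
    (hLL : L' ≤ L) : pvValid cs i L' = true := by
  rw [pvValid, Bool.and_eq_true, decide_eq_true_eq] at h ⊢
  exact ⟨by omega, pvOcc_mono cs i h.2 hLL⟩

-- ---- pvMi facts ----

lemma pvMi_spec (cs : List Char) (i : Nat) (h : 0 < pvMi cs i) :
    pvValid cs i (pvMi cs i) = true := by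
  exact (pvFindGreatest_pos_spec h).2

lemma pvLe_Mi (cs : List Char) {i L : Nat} (h : pvValid cs i L = true) (hL : 0 < L) :
    L ≤ pvMi cs i := by
  have hb : L ≤ cs.length := by
    rw [pvValid, Bool.and_eq_true, decide_eq_true_eq] at h
    omega
  exact Nat.le_findGreatest hb ⟨hL, h⟩

-- ---- pvLb facts ----

lemma pvLb_succ (cs : List Char) (k : Nat) :
    pvLb cs (k + 1) = max (pvLb cs k) (pvMi cs k) := by
  rw [pvLb, pvLb, List.range_succ, List.map_append, List.foldl_append]
  rfl

lemma pvLe_lb (cs : List Char) {i k : Nat} (h : i < k) : pvMi cs i ≤ pvLb cs k := by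
  have := (PySem.List.le_foldl_max (((List.range k).map (pvMi cs))) 0).2
  exact this _ (List.mem_map_of_mem (List.mem_range.mpr h))

lemma pvLb_cases (cs : List Char) (k : Nat) :
    pvLb cs k = 0 ∨ ∃ i < k, pvMi cs i = pvLb cs k := by
  induction k with
  | zero => left; rfl
  | succ k ih =>
    rw [pvLb_succ]
    by_cases hc : pvMi cs k ≤ pvLb cs k
    · rw [Nat.max_eq_left hc]
      rcases ih with h | ⟨i, hi, hmi⟩
      · left; exact h
      · right; exact ⟨i, by omega, hmi⟩
    · rw [Nat.max_eq_right (by omega)]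
      right; exact ⟨k, by omega, rfl⟩

-- ---- inner fold of A ----

lemma pvMiB_pos_spec (cs : List Char) {i m : Nat} (h : 0 < pvMiB cs i m) :
    0 < pvMiB cs i m ∧ i + pvMiB cs i m < m ∧ pvOcc cs i (pvMiB cs i m) = true := by
  rw [pvMiB] at h ⊢
  exact ⟨h, (pvFindGreatest_pos_spec h).2.1, (pvFindGreatest_pos_spec h).2.2⟩

lemma pvIb_some (cs : List Char) {k L : Nat} (hex : ∃ i, i < k ∧ pvValid cs i L = true) :
    (List.range k).find? (fun i => pvValid cs i L) = some (pvIb cs k L) ∧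
      pvValid cs (pvIb cs k L) L = true := by
  obtain ⟨i, hik, hvi⟩ := hex
  have hs : ((List.range k).find? (fun i => pvValid cs i L)).isSome := by
    rw [List.find?_isSome]
    exact ⟨i, List.mem_range.mpr hik, hvi⟩
  obtain ⟨x, hx⟩ := Option.isSome_iff_exists.mp hs
  have hib : pvIb cs k L = x := by rw [pvIb, hx]; rfl
  have h2 := List.find?_some hx
  rw [hib, hx]
  simpa using h2

lemma pvMiB_eq_Mi (cs : List Char) (i : Nat) : pvMiB cs i cs.length = pvMi cs i := by
  apply pvFindGreatest_congr
  intro L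
  constructor
  · rintro ⟨h1, h2, h3⟩
    exact ⟨h1, by rw [pvValid, Bool.and_eq_true, decide_eq_true_eq]; exact ⟨h2, h3⟩⟩
  · rintro ⟨h1, h2⟩
    rw [pvValid, Bool.and_eq_true, decide_eq_true_eq] at h2
    exact ⟨h1, h2.1, h2.2⟩

lemma pvInner_fold (cs : List Char) (iN : Nat) :
    ∀ (m : Nat), iN < m → m ≤ cs.length → ∀ acc : List Char,
      (PySem.List.pyRange ((iN : Int) + 1) (m : Int) 1).foldl (pvInnerA cs (iN : Int)) acc
        = if acc.length < pvMiB cs iN m then (cs.drop iN).take (pvMiB cs iN m) else acc := by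
  intro m
  induction m with
  | zero => intro h1 _ _; exact absurd h1 (Nat.not_lt_zero iN)
  | succ m ih =>
    intro h1 h2 acc
    by_cases hm : iN < m
    · have hc1 : ((m + 1 : Nat) : Int) = (m : Int) + 1 := by push_cast; ring
      have hsplit : PySem.List.pyRange ((iN : Int) + 1) (((m + 1 : Nat)) : Int) 1
          = PySem.List.pyRange ((iN : Int) + 1) ((m : Nat) : Int) 1 ++ [(m : Int)] := by
        rw [hc1]
        exact PySem.List.pyRange_one_succ_right (by omega)
      rw [hsplit, List.foldl_append, ih hm (by omega) acc]
      simp only [List.foldl_cons, List.foldl_nil]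
      rw [pvInnerA, pvCondA cs iN m (le_of_lt hm)]
      cases hocc : pvOcc cs iN (m - iN)
      · have hB : pvMiB cs iN (m + 1) = pvMiB cs iN m := by
          apply pvFindGreatest_congr
          intro L
          constructor
          · rintro ⟨a, b, c⟩
            refine ⟨a, ?_, c⟩
            rcases Nat.lt_or_ge (iN + L) m with h' | h'
            · exact h'
            · exfalso
              have hLm : L = m - iN := by omega
              rw [hLm] at c
              rw [c] at hocc
              simp at hocc
          · rintro ⟨a, b, c⟩
            exact ⟨a, by omega, c⟩
        rw [hB]
        simp
      · have hBm1 : pvMiB cs iN (m + 1) = m - iN := by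
          rw [pvMiB]
          apply pvFindGreatest_eq_of
          · exact ⟨by omega, by omega, hocc⟩
          · omega
          · rintro L ⟨a, b, c⟩
            omega
        have hBlt : pvMiB cs iN m < m - iN := by
          rcases Nat.eq_zero_or_pos (pvMiB cs iN m) with hz | hp
          · omega
          · obtain ⟨a, b, c⟩ := pvMiB_pos_spec cs hp
            omega
        rw [if_pos rfl, hBm1, pvLenA cs iN m (by omega), PySem.List.slice_natCast cs iN m]
        have hlen' : (List.take (pvMiB cs iN m) (List.drop iN cs)).length = pvMiB cs iN m := by
          simp only [List.length_take, List.length_drop]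
          omega
        split_ifs with a b c
        all_goals first
          | rfl
          | (exfalso; rw [hlen'] at *; omega)
    · have hmiN : m = iN := by omega
      subst hmiN
      rw [pvPyRange_one_nil (by push_cast; omega)]
      have hB : pvMiB cs m (m + 1) = 0 := by
        rw [pvMiB, Nat.findGreatest_eq_zero_iff]
        rintro L h0 hLk ⟨a, b, c⟩
        omega
      rw [hB]
      simp

-- ---- outer fold of A ----

lemma pvOuter_fold (cs : List Char) :
    ∀ (k : Nat), k ≤ cs.length →
      (PySem.List.pyRange 0 (k : Int) 1).foldl (pvOuterA cs) []
        = if 0 < pvLb cs k then (cs.drop (pvIb cs k (pvLb cs k))).take (pvLb cs k) else [] := by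
  intro k
  induction k with
  | zero =>
    intro _
    rw [pvPyRange_one_nil (by omega)]
    simp [pvLb]
  | succ k ih =>
    intro hk
    have hc1 : ((k + 1 : Nat) : Int) = (k : Int) + 1 := by push_cast; ring
    have hsplit : PySem.List.pyRange 0 (((k + 1 : Nat)) : Int) 1
        = PySem.List.pyRange 0 ((k : Nat) : Int) 1 ++ [(k : Int)] := by
      rw [hc1]
      exact PySem.List.pyRange_one_succ_right (by omega)
    rw [hsplit, List.foldl_append, ih (by omega)]
    simp only [List.foldl_cons, List.foldl_nil]
    rw [pvOuterA, pvInner_fold cs k cs.length (by omega) (le_refl _), pvMiB_eq_Mi]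
    by_cases hMk : pvLb cs k < pvMi cs k
    · -- new maximum at start k
      have hpos : 0 < pvMi cs k := by omega
      have hvk : pvValid cs k (pvMi cs k) = true := pvMi_spec cs k hpos
      have hmax : pvLb cs (k + 1) = pvMi cs k := by
        rw [pvLb_succ]; omega
      have hnone : (List.range k).find? (fun i => pvValid cs i (pvMi cs k)) = none := by
        rw [List.find?_eq_none]
        intro i hi
        rw [List.mem_range] at hi
        intro hvi
        have h1 := pvLe_Mi cs (by simpa using hvi) hpos
        have h2 := pvLe_lb cs hi
        omega
      have hib : pvIb cs (k + 1) (pvMi cs k) = k := by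
        rw [pvIb, List.range_succ, List.find?_append, hnone, Option.none_or,
          List.find?_cons, hvk]
        rfl
      have hacclen : (if 0 < pvLb cs k then
          (cs.drop (pvIb cs k (pvLb cs k))).take (pvLb cs k) else ([] : List Char)).length
            ≤ pvLb cs k := by
        split_ifs
        · simp only [List.length_take, List.length_drop]; omega
        · simp
      rw [if_pos (by omega : (if 0 < pvLb cs k then
          (cs.drop (pvIb cs k (pvLb cs k))).take (pvLb cs k) else ([] : List Char)).length
            < pvMi cs k)]
      rw [hmax, if_pos (by omega : 0 < pvMi cs k), hib]
    · -- old best survives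
      have hmax : pvLb cs (k + 1) = pvLb cs k := by
        rw [pvLb_succ]; omega
      rw [hmax]
      by_cases hlb : 0 < pvLb cs k
      · obtain ⟨i0, hi0, hmi0⟩ := (pvLb_cases cs k).resolve_left (by omega)
        have hex : ∃ i, i < k ∧ pvValid cs i (pvLb cs k) = true :=
          ⟨i0, hi0, by rw [← hmi0] at hlb ⊢; exact pvMi_spec cs i0 hlb⟩
        obtain ⟨hfind, hvib⟩ := pvIb_some cs hex
        have hib : pvIb cs (k + 1) (pvLb cs k) = pvIb cs k (pvLb cs k) := by
          rw [pvIb, List.range_succ, List.find?_append, hfind]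
          rfl
        have hlen : ((cs.drop (pvIb cs k (pvLb cs k))).take (pvLb cs k)).length
            = pvLb cs k := by
          rw [pvValid, Bool.and_eq_true, decide_eq_true_eq] at hvib
          exact pvLenTake cs _ _ (by omega)
        rw [if_pos hlb, if_pos hlb, hib, hlen, if_neg (by omega)]
      · rw [if_neg hlb, if_neg hlb]
        simp only [List.length_nil]
        rw [if_neg (by omega)]

lemma pvA_eq (s : String) :
    longestPrefixRepeated s = String.ofList (pvBest s.toList) := by
  rw [longestPrefixRepeated]
  by_cases h0 : s.toList.length = 0
  · rw [if_pos h0]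
    have : s.toList = [] := List.length_eq_zero_iff.mp h0
    rw [pvBest, pvLstar, pvLb, this]
    rfl
  · rw [if_neg h0, pvOuter_fold s.toList s.toList.length (le_refl _)]
    rw [pvBest, pvIstar, pvLstar]
    by_cases hlb : 0 < pvLb s.toList s.toList.length
    · rw [if_pos hlb]
    · rw [if_neg hlb]
      have : pvLb s.toList s.toList.length = 0 := by omega
      rw [this, List.take_zero]

-- ---- B: first_start ----

lemma pvFirstStartGo_map (cs : List Char) (L : Nat) (xs : List Nat) :
    pvFirstStartGo cs (L : Int) (xs.map (Nat.cast : Nat → Int))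
      = (xs.find? (fun i => pvOcc cs i L)).map (Nat.cast : Nat → Int) := by
  induction xs with
  | nil => rfl
  | cons x xs ih =>
    rw [List.map_cons, pvFirstStartGo, List.find?_cons]
    have hcast : ((x : Int) + (L : Int)) = (((x + L : Nat)) : Int) := by push_cast; ring
    rw [hcast, pvCondA cs x (x + L) (Nat.le_add_right _ _), Nat.add_sub_cancel_left]
    cases hocc : pvOcc cs x L
    · simpa using ih
    · simp

lemma pvFirstStart_eq (cs : List Char) (L : Nat) (hL : L ≤ cs.length) :
    pvFirstStart cs (L : Int)
      = ((List.range cs.length).find? (fun i => pvValid cs i L)).map (Nat.cast : Nat → Int) := by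
  rw [pvFirstStart]
  have hcast : ((cs.length : Int) - (L : Int)) = (((cs.length - L : Nat)) : Int) := by
    push_cast [hL]; ring
  rw [hcast, PySem.List.pyRange_zero_natCast, pvFirstStartGo_map]
  have hsplit : List.range cs.length
      = List.range (cs.length - L) ++ (List.range L).map (fun i => (cs.length - L) + i) := by
    rw [← List.range_add]
    congr 1
    omega
  rw [hsplit, List.find?_append]
  have hright : ((List.range L).map (fun i => (cs.length - L) + i)).find?
      (fun i => pvValid cs i L) = none := by
    rw [List.find?_eq_none]
    intro a ha
    simp only [List.mem_map, List.mem_range] at ha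
    obtain ⟨b, hb, rfl⟩ := ha
    rw [pvValid, Bool.and_eq_true, decide_eq_true_eq]
    rintro ⟨hlt, -⟩
    omega
  rw [hright, Option.or_none]
  apply congrArg
  apply pvFind?_congr_mem
  intro a ha
  rw [List.mem_range] at ha
  rw [pvValid]
  have : decide (a + L < cs.length) = true := by
    rw [decide_eq_true_eq]; omega
  rw [this, Bool.true_and]

lemma pvFeas_le_lb (cs : List Char) {i L : Nat} (h : pvValid cs i L = true) (hL : 0 < L) :
    L ≤ pvLb cs cs.length := by
  have hin : i < cs.length := by
    rw [pvValid, Bool.and_eq_true, decide_eq_true_eq] at h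
    omega
  exact le_trans (pvLe_Mi cs h hL) (pvLe_lb cs hin)

lemma pvLb_feas (cs : List Char) (h : 0 < pvLb cs cs.length) :
    ∃ i, pvValid cs i (pvLb cs cs.length) = true := by
  rcases pvLb_cases cs cs.length with h0 | ⟨i, hi, hmi⟩
  · omega
  · exact ⟨i, by rw [← hmi] at h ⊢; exact pvMi_spec cs i h⟩

lemma pvIstar_zero (cs : List Char) (h : pvLstar cs = 0) : pvIstar cs = 0 := by
  rw [pvIstar, h, pvIb]
  cases cs with
  | nil => rfl
  | cons c cs =>
    rw [List.length_cons, List.range_succ_eq_map, List.find?_cons]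
    have : pvValid (c :: cs) 0 0 = true := by
      rw [pvValid, pvOcc]
      simp
    rw [this]
    rfl

lemma pvBSearch_final (cs : List Char) (lo hi bi bl : Int)
    (hlt : hi < lo)
    (h3 : ∀ L : Nat, hi < (L : Int) → 0 < L → ¬ ∃ i, pvValid cs i L = true)
    (h4 : (bi = 0 ∧ bl = 0 ∧ lo = 1) ∨
      (bl = lo - 1 ∧ ∃ blN : Nat, bl = (blN : Int) ∧ 0 < blN ∧
        (∃ i, pvValid cs i blN = true) ∧ ((pvIb cs cs.length blN : Nat) : Int) = bi)) :
    bi = ((pvIstar cs : Nat) : Int) ∧ bl = ((pvLstar cs : Nat) : Int) := by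
  rcases h4 with ⟨hbi, hbl, hlo⟩ | ⟨hbl, blN, hcast, hpos, hex, hib⟩
  · have hL0 : pvLstar cs = 0 := by
      by_contra hne
      have hp : 0 < pvLb cs cs.length := by
        rw [pvLstar] at hne; omega
      obtain ⟨i, hv⟩ := pvLb_feas cs hp
      refine h3 (pvLb cs cs.length) (by omega) hp ⟨i, hv⟩
    rw [pvIstar_zero cs hL0, hL0, hbi, hbl]
    simp
  · have hLeq : pvLstar cs = blN := by
      rw [pvLstar]
      apply le_antisymm
      · by_contra hgt
        have hp : 0 < pvLb cs cs.length := by omega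
        obtain ⟨i, hv⟩ := pvLb_feas cs hp
        refine h3 (pvLb cs cs.length) (by omega) hp ⟨i, hv⟩
      · obtain ⟨i, hv⟩ := hex
        exact pvFeas_le_lb cs hv hpos
    constructor
    · rw [← hib, pvIstar, hLeq]
    · rw [hLeq]
      exact hcast

lemma pvBSearch_correct (cs : List Char) :
    ∀ (lo hi bi bl : Int), 1 ≤ lo → hi ≤ (cs.length : Int) - 1 →
      (∀ L : Nat, hi < (L : Int) → 0 < L → ¬ ∃ i, pvValid cs i L = true) →
      ((bi = 0 ∧ bl = 0 ∧ lo = 1) ∨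
        (bl = lo - 1 ∧ ∃ blN : Nat, bl = (blN : Int) ∧ 0 < blN ∧
          (∃ i, pvValid cs i blN = true) ∧ ((pvIb cs cs.length blN : Nat) : Int) = bi)) →
      pvBSearch cs lo hi bi bl = ((pvIstar cs : Int), (pvLstar cs : Int)) := by
  suffices main : ∀ fuel : Nat, ∀ lo hi bi bl : Int, (hi + 1 - lo).toNat ≤ fuel →
      1 ≤ lo → hi ≤ (cs.length : Int) - 1 →
      (∀ L : Nat, hi < (L : Int) → 0 < L → ¬ ∃ i, pvValid cs i L = true) →
      ((bi = 0 ∧ bl = 0 ∧ lo = 1) ∨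
        (bl = lo - 1 ∧ ∃ blN : Nat, bl = (blN : Int) ∧ 0 < blN ∧
          (∃ i, pvValid cs i blN = true) ∧ ((pvIb cs cs.length blN : Nat) : Int) = bi)) →
      pvBSearch cs lo hi bi bl = ((pvIstar cs : Int), (pvLstar cs : Int)) by
    intro lo hi bi bl h1 h2 h3 h4
    exact main (hi + 1 - lo).toNat lo hi bi bl (le_refl _) h1 h2 h3 h4
  intro fuel
  induction fuel with
  | zero =>
    intro lo hi bi bl hf h1 h2 h3 h4
    have hlt : hi < lo := by omega
    rw [pvBSearch, dif_neg (by omega : ¬ lo ≤ hi)]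
    obtain ⟨e1, e2⟩ := pvBSearch_final cs lo hi bi bl hlt h3 h4
    rw [e1, e2]
  | succ f ih =>
    intro lo hi bi bl hf h1 h2 h3 h4
    by_cases hlh : lo ≤ hi
    · rw [pvBSearch, dif_pos hlh]
      dsimp only
      obtain ⟨hm1, hm2⟩ := PySem.Int.floordiv_two_mid_bounds hlh
      set mid := PySem.Int.floordiv (lo + hi) 2 with hmiddef
      have hmid0 : 0 ≤ mid := by omega
      set midN := mid.toNat with hmN
      have hcast : (midN : Int) = mid := Int.toNat_of_nonneg hmid0
      have hmn : midN ≤ cs.length := by omega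
      rw [← hcast, pvFirstStart_eq cs midN hmn]
      cases hfind : (List.range cs.length).find? (fun i => pvValid cs i midN) with
      | none =>
        simp only [Option.map_none]
        apply ih
        · omega
        · exact h1
        · omega
        · intro L hL hL0 hex
          obtain ⟨i, hv⟩ := hex
          rcases Nat.lt_or_ge L midN with hc | hc
          · exact h3 L (by omega) hL0 ⟨i, hv⟩
          · have hvm : pvValid cs i midN = true := pvValid_mono cs i hv hc
            have hbound : i < cs.length := by
              rw [pvValid, Bool.and_eq_true, decide_eq_true_eq] at hvm
              omega
            have := List.find?_eq_none.mp hfind i (List.mem_range.mpr hbound)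
            simp only [hvm] at this
            exact this trivial
        · exact h4
      | some x =>
        simp only [Option.map_some]
        apply ih
        · omega
        · omega
        · exact h2
        · exact h3
        · right
          refine ⟨by ring, midN, rfl, by omega, ?_, ?_⟩
          · refine ⟨x, ?_⟩
            have := List.find?_some hfind
            simpa using this
          · rw [pvIb, hfind]
            rfl
    · rw [pvBSearch, dif_neg hlh]
      obtain ⟨e1, e2⟩ := pvBSearch_final cs lo hi bi bl (by omega) h3 h4
      rw [e1, e2]

lemma pvAlt_eq (s : String) :
    longestPrefixRepeated_alt s = String.ofList (pvBest s.toList) := by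
  have hrun := pvBSearch_correct s.toList 1 ((s.toList.length : Int) - 1) 0 0 (le_refl 1)
    (by omega)
    (by
      rintro L hL hL0 ⟨i, hv⟩
      rw [pvValid, Bool.and_eq_true, decide_eq_true_eq] at hv
      omega)
    (Or.inl ⟨rfl, rfl, rfl⟩)
  rw [longestPrefixRepeated_alt]
  simp only [hrun]
  have hc : ((pvIstar s.toList : Nat) : Int) + ((pvLstar s.toList : Nat) : Int)
      = (((pvIstar s.toList + pvLstar s.toList : Nat)) : Int) := by push_cast; ring
  rw [hc, PySem.List.slice_natCast, Nat.add_sub_cancel_left, pvBest]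

-- ===== VERDICT (by name: the statement is the Claim_ definition above) =====
theorem longestPrefixRepeated_spec : Claim_equal_longestPrefixRepeated := by
  intro s _
  unfold Spec_longestPrefixRepeated
  rw [pvA_eq, pvAlt_eq]
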